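-- pv_equiv track=rewrite | github.com/lleonova/jobeasy-algorithms-course | 5 lesson/Sum_of_odd_numbers.py | sum_odd_numbers_1
-- ===== SOURCE A (Python) =====
-- def sum_odd_numbers_1 (index):
--     # First number:
--     n = index ** 2 - index + 1
--     summ= 0
--     i = 0
--     while i < index:
--         summ = n + summ
--         i += 1
--         n += 2
--     return summ
-- ===== SOURCE B (Python) =====
-- def sum_odd_numbers_1(index):
--     # Closed form: the n-th row of consecutive odd numbers sums to n**3.
--     return index ** 3 if index >= 0 else 0
-- ===== Notes on version B (the rewrite author's own statement) =====
-- stated objective: faster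
-- what changed: Replaced the O(n) accumulation loop over the row's odd numbers by the closed form index**3 (0 for negative index).
import Mathlib
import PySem

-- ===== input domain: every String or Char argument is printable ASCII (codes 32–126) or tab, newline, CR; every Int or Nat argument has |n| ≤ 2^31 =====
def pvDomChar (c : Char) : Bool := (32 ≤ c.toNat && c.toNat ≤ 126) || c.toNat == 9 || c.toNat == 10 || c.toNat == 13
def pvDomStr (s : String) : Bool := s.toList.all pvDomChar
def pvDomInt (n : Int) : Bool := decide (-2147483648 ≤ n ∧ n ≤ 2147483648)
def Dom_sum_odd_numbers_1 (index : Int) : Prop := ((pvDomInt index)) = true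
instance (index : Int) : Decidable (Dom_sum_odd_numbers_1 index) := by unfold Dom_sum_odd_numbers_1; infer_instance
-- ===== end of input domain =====

-- B replaces A's O(n) accumulation loop by the closed form index**3 (0 for negative index); faster (asymptotic).

-- ===== PORT A =====
-- the while loop of A: state (summ, i, n), iterating while i < index
def sumOddLoop (index : Int) (summ i n : Int) : Int :=
  if i < index then sumOddLoop index (n + summ) (i + 1) (n + 2) else summ
termination_by (index - i).toNat
decreasing_by
  have h : i < index := by assumption
  omega

def sum_odd_numbers_1 (index : Int) : Int :=
  sumOddLoop index 0 0 (index ^ 2 - index + 1)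

-- ===== PORT B =====
def sum_odd_numbers_1_alt (index : Int) : Int :=
  if index ≥ 0 then index ^ 3 else 0

-- ===== PRECONDITION & SPEC =====
def Spec_sum_odd_numbers_1 (index : Int) (out : Int) : Prop := out = sum_odd_numbers_1_alt index
instance (index : Int) (out : Int) : Decidable (Spec_sum_odd_numbers_1 index out) := by unfold Spec_sum_odd_numbers_1; infer_instance

-- ===== CLAIM (what is proved, stated in full; the proofs are below) =====
def Claim_equal_sum_odd_numbers_1 : Prop := ∀ (index : Int), Dom_sum_odd_numbers_1 index → Spec_sum_odd_numbers_1 index (sum_odd_numbers_1 index)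

-- ===== LEMMAS AND PROOFS =====

-- closed form for the loop: with k remaining iterations it adds k·n + k·(k−1) to summ
theorem sumOddLoop_closed (k : Nat) : ∀ (index summ i n : Int),
    (index - i).toNat = k →
    sumOddLoop index summ i n = summ + k * n + k * (k - 1) := by
  induction k with
  | zero =>
    intro index summ i n hk
    rw [sumOddLoop]
    have : ¬ i < index := by omega
    simp [this]
  | succ m ih =>
    intro index summ i n hk
    rw [sumOddLoop]
    have h : i < index := by omega
    rw [if_pos h]
    rw [ih index (n + summ) (i + 1) (n + 2) (by omega)]
    push_cast
    ring

theorem sum_odd_eq : ∀ (index : Int), sum_odd_numbers_1 index = sum_odd_numbers_1_alt index := by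
  intro index
  unfold sum_odd_numbers_1 sum_odd_numbers_1_alt
  by_cases h : 0 ≤ index
  · rw [sumOddLoop_closed index.toNat index 0 0 (index ^ 2 - index + 1) (by omega)]
    rw [if_pos h]
    have hi : (index.toNat : Int) = index := by omega
    rw [hi]
    ring
  · rw [sumOddLoop_closed 0 index 0 0 (index ^ 2 - index + 1) (by omega)]
    rw [if_neg h]
    ring

-- ===== VERDICT (by name: the statement is the Claim_ definition above) =====
theorem sum_odd_numbers_1_spec : Claim_equal_sum_odd_numbers_1 := by
  intro index _
  unfold Spec_sum_odd_numbers_1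
  exact sum_odd_eq index
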